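-- pv_equiv track=rewrite | github.com/Fares006/gestionBudget | src/main.py | decryptage
-- ===== SOURCE A (Python) =====
-- CLE_CRYPTAGE = 23
--
-- def decryptage(chaine: str, cle: int = CLE_CRYPTAGE) -> str:
--     """
--     Fonction, avec 2 options en paramètres, qui renvoie une chaîne de caractères décryptée
--     avec la méthode César, selon la clé fournie.
--
--     Args:
--         chaine: texte à décrypter
--         cle: clé qui sera utilisée pour le décryptage
--
--     Returns:
--         str: la chaine décryptée
--     """
--     decrypte = ''
--     for char in chaine:
--         if char == '\n' or char == '*':
--             decrypte += char
--         else: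
--             decrypte += chr(ord(char) - cle)
--     return decrypte
-- ===== SOURCE B (Python) =====
-- CLE_CRYPTAGE = 23
--
-- def decryptage(chaine: str, cle: int = CLE_CRYPTAGE) -> str:
--     table = {ord(c): chr(ord(c) - cle) for c in set(chaine) if c != '\n' and c != '*'}
--     return chaine.translate(table)
-- ===== Notes on version B (the rewrite author's own statement) =====
-- stated objective: idiomatic
-- what changed: Replaces the char-by-char string-accumulation loop with a substitution table built once over the distinct characters and applied in a single str.translate pass.
-- outside the precondition, e.g. on decryptage(' ', 1114101): A raises ValueError, B raises ValueError
import Mathlib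
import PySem

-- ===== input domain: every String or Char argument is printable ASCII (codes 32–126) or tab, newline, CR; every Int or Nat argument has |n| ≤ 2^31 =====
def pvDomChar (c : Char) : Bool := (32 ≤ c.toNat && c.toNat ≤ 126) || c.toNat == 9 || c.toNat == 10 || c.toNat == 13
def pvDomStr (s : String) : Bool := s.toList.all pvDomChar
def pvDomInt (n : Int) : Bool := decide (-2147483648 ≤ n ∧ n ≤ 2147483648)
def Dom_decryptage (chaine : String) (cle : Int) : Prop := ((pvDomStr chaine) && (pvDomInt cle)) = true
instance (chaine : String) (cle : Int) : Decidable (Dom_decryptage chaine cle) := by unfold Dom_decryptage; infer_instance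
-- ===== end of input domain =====

-- B replaces A's char-by-char accumulation loop with a substitution table built once
-- over the distinct characters and applied in one translate pass (objective: idiomatic).

-- ===== PORT A =====
-- chr(n): exact on inputs admitted by Pre_decryptage (0 ≤ n ≤ 0x10FFFF, not a surrogate)
def pvChr (n : Int) : Char := Char.ofNat n.toNat

def decryptage (chaine : String) (cle : Int) : String :=
  String.ofList (chaine.toList.foldl
    (fun decrypte char =>
      if char = '\n' ∨ char = '*' then decrypte ++ [char]
      else decrypte ++ [pvChr ((char.toNat : Int) - cle)]) [])

-- ===== PORT B =====
def decryptage_alt (chaine : String) (cle : Int) : String :=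
  let table : PySem.Dict Int Char :=
    (PySem.Set.ofList chaine.toList).foldl
      (fun d c =>
        if c = '\n' ∨ c = '*' then d
        else d.insert ((c.toNat : Int)) (pvChr ((c.toNat : Int) - cle)))
      PySem.Dict.empty
  String.ofList (chaine.toList.map (fun c => (table.get? ((c.toNat : Int))).getD c))

-- ===== PRECONDITION & SPEC =====
-- Pre_ excludes exactly the inputs where some shifted code ord(c) - cle is negative or
-- above 0x10FFFF (there Python's chr raises ValueError, so A raises) or falls in the
-- surrogate band 0xD800–0xDFFF (there A returns a lone-surrogate string, which is not
-- representable as a Lean String/Char, i.e. no value of the declared type here).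
def Pre_decryptage (chaine : String) (cle : Int) : Prop :=
  (chaine.toList.all (fun c => c = '\n' ∨ c = '*' ∨
    (0 ≤ (c.toNat : Int) - cle ∧ (c.toNat : Int) - cle ≤ 1114111 ∧
      ¬(55296 ≤ (c.toNat : Int) - cle ∧ (c.toNat : Int) - cle ≤ 57343)))) = true
instance (chaine : String) (cle : Int) : Decidable (Pre_decryptage chaine cle) := by
  unfold Pre_decryptage; infer_instance
def pvWitness_decryptage : String × Int := ("Khoor*Z\nruog", 3)
def Spec_decryptage (chaine : String) (cle : Int) (out : String) : Prop := out = decryptage_alt chaine cle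
instance (chaine : String) (cle : Int) (out : String) : Decidable (Spec_decryptage chaine cle out) := by unfold Spec_decryptage; infer_instance

-- ===== CLAIM (what is proved, stated in full; the proofs are below) =====
def Claim_equal_decryptage : Prop := ∀ (chaine : String) (cle : Int), Dom_decryptage chaine cle → Pre_decryptage chaine cle → Spec_decryptage chaine cle (decryptage chaine cle)

-- ===== LEMMAS AND PROOFS =====

-- the per-character translation both programs effect
def pvTrans (cle : Int) (c : Char) : Char :=
  if c = '\n' ∨ c = '*' then c else pvChr ((c.toNat : Int) - cle)

theorem pvOrdInj {a b : Char} (h : ((a.toNat : Int)) = ((b.toNat : Int))) : a = b := by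
  have h2 : a.toNat = b.toNat := by exact_mod_cast h
  have := congrArg Char.ofNat h2
  simpa [Char.ofNat_toNat] using this

theorem pvTableGet (cle : Int) (s : List Char) (d : PySem.Dict Int Char) (c : Char) :
    ((s.foldl
      (fun d c =>
        if c = '\n' ∨ c = '*' then d
        else d.insert ((c.toNat : Int)) (pvChr ((c.toNat : Int) - cle))) d).get?
        ((c.toNat : Int)))
      = if c ∈ s ∧ ¬(c = '\n' ∨ c = '*') then some (pvChr ((c.toNat : Int) - cle))
        else d.get? ((c.toNat : Int)) := by
  induction s generalizing d with
  | nil => simp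
  | cons a t ih =>
    simp only [List.foldl_cons]
    by_cases ha : a = '\n' ∨ a = '*'
    · rw [if_pos ha, ih]
      by_cases hc : c = a
      · subst hc; simp [ha]
      · simp [List.mem_cons, hc]
    · rw [if_neg ha, ih]
      by_cases hmem : c ∈ t ∧ ¬(c = '\n' ∨ c = '*')
      · simp [hmem, List.mem_cons]
      · rw [if_neg hmem, PySem.Dict.get?_insert]
        by_cases hc : c = a
        · subst hc; simp [ha]
        · have hne : ((c.toNat : Int)) ≠ ((a.toNat : Int)) := fun h => hc (pvOrdInj h)
          rw [if_neg hne]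
          have : ¬(c ∈ a :: t ∧ ¬(c = '\n' ∨ c = '*')) := by
            intro ⟨h1, h2⟩
            rcases List.mem_cons.mp h1 with h | h
            · exact hc h
            · exact hmem ⟨h, h2⟩
          rw [if_neg this]

theorem pvAltChar (cle : Int) (l : List Char) (c : Char) (hc : c ∈ l) :
    (((PySem.Set.ofList l).foldl
      (fun d c =>
        if c = '\n' ∨ c = '*' then d
        else d.insert ((c.toNat : Int)) (pvChr ((c.toNat : Int) - cle)))
      PySem.Dict.empty).get? ((c.toNat : Int))).getD c = pvTrans cle c := by
  rw [pvTableGet]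
  have hmem : c ∈ PySem.Set.ofList l := by
    simpa [PySem.Set.mem_ofList] using hc
  by_cases he : c = '\n' ∨ c = '*'
  · simp [he, pvTrans]
  · simp [hmem, he, pvTrans]

-- ===== VERDICT (by name: the statement is the Claim_ definition above) =====
theorem decryptage_spec : Claim_equal_decryptage := by
  intro chaine cle _ _
  unfold Spec_decryptage decryptage decryptage_alt
  have hA : chaine.toList.foldl
      (fun decrypte char =>
        if char = '\n' ∨ char = '*' then decrypte ++ [char]
        else decrypte ++ [pvChr ((char.toNat : Int) - cle)]) []
      = chaine.toList.map (pvTrans cle) := by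
    have := PySem.List.foldl_congr_mem
      (l := chaine.toList) (init := ([] : List Char))
      (f := fun decrypte char =>
        if char = '\n' ∨ char = '*' then decrypte ++ [char]
        else decrypte ++ [pvChr ((char.toNat : Int) - cle)])
      (g := fun decrypte char => decrypte ++ [pvTrans cle char])
      (by intro acc x _; by_cases h : x = '\n' ∨ x = '*' <;> simp [pvTrans, h])
    rw [this, PySem.List.foldl_append_singleton_eq_map]
    simp
  rw [hA]
  congr 1
  exact (List.map_congr_left (fun c hc => (pvAltChar cle chaine.toList c hc).symm))
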